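-- pv_equiv track=rewrite | github.com/Lukeisun/aoc2024 | py_solns/day07.py | horners_dbl
-- ===== SOURCE A (Python) =====
-- def horners_dbl(x: int, y: int):
--     res = 0
--     n = 0
--     while (y != 0):
--         yc = y % 10
--         res +=  yc * (10 ** n)
--         n += 1
--         y = y // 10
--
--     while (x != 0):
--         xc = x % 10
--         res += xc * (10 ** n)
--         n += 1
--         x = x // 10
--     return res
-- ===== SOURCE B (Python) =====
-- def horners_dbl(x: int, y: int):
--     p = 1
--     while p <= y:
--         p *= 10
--     return x * p + y
-- ===== Notes on version B (the rewrite author's own statement) =====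
-- stated objective: simpler
-- what changed: Replaces the two digit-by-digit Horner accumulation loops with a single loop computing the smallest power of ten exceeding y, then the closed form x*p + y.
import Mathlib
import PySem

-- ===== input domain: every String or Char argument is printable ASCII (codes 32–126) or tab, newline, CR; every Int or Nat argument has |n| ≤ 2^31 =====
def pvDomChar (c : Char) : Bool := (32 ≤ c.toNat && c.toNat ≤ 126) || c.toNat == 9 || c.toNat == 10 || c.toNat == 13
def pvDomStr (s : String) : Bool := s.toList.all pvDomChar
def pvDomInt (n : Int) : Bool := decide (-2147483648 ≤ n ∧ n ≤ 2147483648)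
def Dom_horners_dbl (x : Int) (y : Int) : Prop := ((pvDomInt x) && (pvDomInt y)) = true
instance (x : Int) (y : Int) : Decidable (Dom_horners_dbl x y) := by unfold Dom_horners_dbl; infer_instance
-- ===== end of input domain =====

-- One honest line: B replaces A's two Horner digit loops by one power-of-ten loop plus the closed form x*p + y.

-- ===== PORT A =====
-- the while loop over y (and then x): fuel makes the possibly-nonterminating Python while total;
-- 64 steps are more than enough for any |int| ≤ 2^31 (Dom), where the Python loop runs ≤ 10 iterations
def pvLoopA (fuel : Nat) (y res : Int) (n : Nat) : Int × Nat :=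
  match fuel with
  | 0 => (res, n)
  | f+1 =>
    if y ≠ 0 then
      pvLoopA f (PySem.Int.floordiv y 10) (res + PySem.Int.mod y 10 * 10 ^ n) (n + 1)
    else (res, n)

def horners_dbl (x : Int) (y : Int) : Int :=
  let r1 := pvLoopA 64 y 0 0
  (pvLoopA 64 x r1.1 r1.2).1

-- ===== PORT B =====
-- while p <= y: p *= 10  (fuel-totalised, same remark as above)
def pvPow10 (fuel : Nat) (y p : Int) : Int :=
  match fuel with
  | 0 => p
  | f+1 => if p ≤ y then pvPow10 f y (p * 10) else p

def horners_dbl_alt (x : Int) (y : Int) : Int :=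
  x * pvPow10 64 y 1 + y

-- ===== PRECONDITION & SPEC =====
-- Pre_ excludes negative x or y: there Python A's while loop never terminates (y //= 10 converges to -1, never 0).
def Pre_horners_dbl (x : Int) (y : Int) : Prop := 0 ≤ x ∧ 0 ≤ y
instance (x : Int) (y : Int) : Decidable (Pre_horners_dbl x y) := by unfold Pre_horners_dbl; infer_instance
def pvWitness_horners_dbl : Int × Int := (12, 340)

def Spec_horners_dbl (x : Int) (y : Int) (out : Int) : Prop := out = horners_dbl_alt x y
instance (x : Int) (y : Int) (out : Int) : Decidable (Spec_horners_dbl x y out) := by unfold Spec_horners_dbl; infer_instance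

-- ===== CLAIM (what is proved, stated in full; the proofs are below) =====
def Claim_equal_horners_dbl : Prop := ∀ (x : Int) (y : Int), Dom_horners_dbl x y → Pre_horners_dbl x y → Spec_horners_dbl x y (horners_dbl x y)

-- ===== LEMMAS AND PROOFS =====

/-- number of decimal digits (0 for 0); proof-side characterisation helper -/
def digs (n : Nat) : Nat :=
  if n = 0 then 0 else digs (n / 10) + 1
decreasing_by exact Nat.div_lt_self (Nat.pos_of_ne_zero (by assumption)) (by norm_num)

theorem digs_ne_zero {m : Nat} (h : m ≠ 0) : digs m = digs (m / 10) + 1 := by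
  rw [digs]; simp [h]

theorem pvLoopA_eq (f : Nat) : ∀ (m : Nat) (res : Int) (n : Nat), m < 10 ^ f →
    pvLoopA f (m : Int) res n = (res + m * 10 ^ n, n + digs m) := by
  induction f with
  | zero =>
    intro m res n hm
    interval_cases m
    simp [pvLoopA, digs]
  | succ f ih =>
    intro m res n hm
    by_cases h0 : m = 0
    · subst h0; simp [pvLoopA, digs]
    · have hcast : ((m : Int) ≠ 0) := by exact_mod_cast h0
      rw [pvLoopA]
      simp only [hcast, if_pos, ne_eq, not_false_eq_true]
      have hfd : PySem.Int.floordiv (m : Int) 10 = ((m / 10 : Nat) : Int) := by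
        exact_mod_cast PySem.Int.floordiv_natCast m 10
      have hmd : PySem.Int.mod (m : Int) 10 = ((m % 10 : Nat) : Int) := by
        exact_mod_cast PySem.Int.mod_natCast m 10
      rw [hfd, hmd, ih (m / 10) _ _ (by
        have : m < 10 * 10 ^ f := by rw [← pow_succ']; exact hm
        omega)]
      simp only [Prod.mk.injEq]
      refine ⟨?_, ?_⟩
      · have hm10 : (m : Int) = ((m / 10 : Nat) : Int) * 10 + ((m % 10 : Nat) : Int) := by
          push_cast; omega
        rw [hm10]; ring
      · rw [digs_ne_zero h0]; omega

theorem pvPow10_eq (f : Nat) : ∀ (y p : Int), 0 ≤ y → 0 < p → y < p * 10 ^ f →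
    pvPow10 f y p = p * 10 ^ (digs (y / p).toNat) := by
  induction f with
  | zero =>
    intro y p hy hp hlt
    have h0 : y / p = 0 := Int.ediv_eq_zero_of_lt hy (by simpa using hlt)
    simp [pvPow10, h0, digs]
  | succ f ih =>
    intro y p hy hp hlt
    rw [pvPow10]
    by_cases hle : p ≤ y
    · rw [if_pos hle]
      have h1 : (1 : Int) ≤ y / p := Int.le_ediv_iff_mul_le hp |>.mpr (by omega)
      rw [ih y (p * 10) hy (by omega) (by rw [mul_assoc, ← pow_succ']; exact hlt)]
      have hdd : y / (p * 10) = y / p / 10 := (Int.ediv_ediv_of_nonneg (by omega : (0:Int) ≤ p)).symm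
      set q : Int := y / p with hq
      have hq0 : (0 : Int) ≤ q := by omega
      have htn : (q / 10).toNat = q.toNat / 10 := by omega
      have hne : q.toNat ≠ 0 := by omega
      rw [hdd, htn, digs_ne_zero hne, pow_succ]
      ring
    · rw [if_neg hle]
      have h0 : y / p = 0 := Int.ediv_eq_zero_of_lt hy (by omega)
      simp [h0, digs]

-- ===== VERDICT (by name: the statement is the Claim_ definition above) =====
theorem horners_dbl_spec : Claim_equal_horners_dbl := by
  intro x y hdom hpre
  obtain ⟨hx, hy⟩ := hpre
  have hxb : x ≤ 2147483648 := by
    simp [Dom_horners_dbl, pvDomInt] at hdom; omega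
  have hyb : y ≤ 2147483648 := by
    simp [Dom_horners_dbl, pvDomInt] at hdom; omega
  unfold Spec_horners_dbl horners_dbl horners_dbl_alt
  have hycast : ((y.toNat : Int)) = y := Int.toNat_of_nonneg hy
  have hxcast : ((x.toNat : Int)) = x := Int.toNat_of_nonneg hx
  have hybound : y.toNat < 10 ^ 64 := by
    have : (10 : Nat) ^ 64 ≥ 10 ^ 10 := Nat.pow_le_pow_right (by norm_num) (by norm_num)
    have : (10 : Nat) ^ 10 = 10000000000 := by norm_num
    omega
  have hxbound : x.toNat < 10 ^ 64 := by
    have : (10 : Nat) ^ 64 ≥ 10 ^ 10 := Nat.pow_le_pow_right (by norm_num) (by norm_num)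
    have : (10 : Nat) ^ 10 = 10000000000 := by norm_num
    omega
  have h1 := pvLoopA_eq 64 y.toNat 0 0 hybound
  rw [hycast] at h1
  simp only [zero_add, pow_zero, mul_one] at h1
  have h2 := pvLoopA_eq 64 x.toNat y (digs y.toNat) hxbound
  rw [hxcast] at h2
  have h3 : pvPow10 64 y 1 = 10 ^ (digs y.toNat) := by
    rw [pvPow10_eq 64 y 1 hy (by norm_num) (by
      have : (10 : Int) ^ 64 ≥ 10 ^ 10 := pow_le_pow_right₀ (by norm_num) (by norm_num)
      have : (10 : Int) ^ 10 = 10000000000 := by norm_num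
      omega)]
    simp
  rw [h1]
  simp only [h2, h3]
  ring
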